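-- pv_equiv track=rewrite | github.com/aravinduv/GoMoku | gomoku.py | getRowRight
-- ===== SOURCE A (Python) =====
-- def getRowRight(xval,yval,maxSize):
-- 	list6 = []
-- 	while (yval <= (maxSize-1)):
-- 		if ((yval + 1) <= (maxSize-1)):
-- 			list6.append(str(xval)+","+str(yval+1))
-- 			yval = yval + 1
-- 		else:
-- 			break
--
-- 	if len(list6) != 0:
-- 		return list6[-1]
-- 	else:
-- 		list6.append(str(xval)+","+str(yval))
-- 		return list6[-1]
-- ===== SOURCE B (Python) =====
-- def getRowRight(xval, yval, maxSize):
--     # Closed form: the scan ends at maxSize-1 unless yval already is at/past it.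
--     return str(xval) + "," + str(max(yval, maxSize - 1))
-- ===== Notes on version B (the rewrite author's own statement) =====
-- stated objective: faster
-- what changed: Replaces the rightward step-by-step scan (and the list it accumulates) with the closed form max(yval, maxSize-1).
import Mathlib
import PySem

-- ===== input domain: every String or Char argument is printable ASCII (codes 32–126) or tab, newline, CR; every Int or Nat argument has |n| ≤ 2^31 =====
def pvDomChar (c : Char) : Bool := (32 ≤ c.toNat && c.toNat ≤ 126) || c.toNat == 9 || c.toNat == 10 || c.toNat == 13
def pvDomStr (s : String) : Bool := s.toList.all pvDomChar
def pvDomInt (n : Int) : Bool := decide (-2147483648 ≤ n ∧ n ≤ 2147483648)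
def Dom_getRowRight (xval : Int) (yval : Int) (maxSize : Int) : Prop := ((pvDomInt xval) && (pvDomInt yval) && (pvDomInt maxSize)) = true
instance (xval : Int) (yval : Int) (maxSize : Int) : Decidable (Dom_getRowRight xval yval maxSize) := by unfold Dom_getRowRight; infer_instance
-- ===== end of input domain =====

-- B replaces A's step-by-step rightward scan by the closed form max(yval, maxSize-1); faster (O(1) vs O(maxSize - yval)).

-- ===== PORT A =====
-- the while loop of A: returns (list6, final yval)
def getRowRightLoop (xval : Int) (maxSize : Int) (yval : Int) (list6 : List String) : List String × Int :=
  if yval ≤ maxSize - 1 then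
    if yval + 1 ≤ maxSize - 1 then
      getRowRightLoop xval maxSize (yval + 1) (list6 ++ [PySem.Int.toStr xval ++ "," ++ PySem.Int.toStr (yval + 1)])
    else (list6, yval)
  else (list6, yval)
termination_by (maxSize - 1 - yval).toNat
decreasing_by omega

def getRowRight (xval : Int) (yval : Int) (maxSize : Int) : String :=
  let r := getRowRightLoop xval maxSize yval []
  let list6 := r.1
  let yval := r.2
  if list6.length ≠ 0 then
    (PySem.List.pyGet? list6 (-1)).getD ""   -- list6[-1]; list6 is nonempty here so never the default
  else
    let list6 := list6 ++ [PySem.Int.toStr xval ++ "," ++ PySem.Int.toStr yval]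
    (PySem.List.pyGet? list6 (-1)).getD ""

-- ===== PORT B =====
def getRowRight_alt (xval : Int) (yval : Int) (maxSize : Int) : String :=
  PySem.Int.toStr xval ++ "," ++ PySem.Int.toStr (max yval (maxSize - 1))

-- ===== PRECONDITION & SPEC =====
def Spec_getRowRight (xval : Int) (yval : Int) (maxSize : Int) (out : String) : Prop := out = getRowRight_alt xval yval maxSize
instance (xval : Int) (yval : Int) (maxSize : Int) (out : String) : Decidable (Spec_getRowRight xval yval maxSize out) := by unfold Spec_getRowRight; infer_instance

-- ===== CLAIM (what is proved, stated in full; the proofs are below) =====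
def Claim_equal_getRowRight : Prop := ∀ (xval : Int) (yval : Int) (maxSize : Int), Dom_getRowRight xval yval maxSize → Spec_getRowRight xval yval maxSize (getRowRight xval yval maxSize)

-- ===== LEMMAS AND PROOFS =====

-- the loop, started below maxSize-1, ends at maxSize-1 with the target string last in the list
theorem getRowRightLoop_lt (xval maxSize : Int) :
    ∀ (n : Nat) (yval : Int) (acc : List String), (maxSize - 1 - yval).toNat = n → yval < maxSize - 1 →
      ∃ l, getRowRightLoop xval maxSize yval acc
        = (acc ++ l ++ [PySem.Int.toStr xval ++ "," ++ PySem.Int.toStr (maxSize - 1)], maxSize - 1) := by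
  intro n
  induction n with
  | zero => intro yval acc hn hy; omega
  | succ k ih =>
    intro yval acc hn hy
    rw [getRowRightLoop]
    have h1 : yval ≤ maxSize - 1 := le_of_lt hy
    have h2 : yval + 1 ≤ maxSize - 1 := hy
    simp only [h1, h2, if_pos]
    by_cases h3 : yval + 1 < maxSize - 1
    · obtain ⟨l, hl⟩ := ih (yval + 1)
        (acc ++ [PySem.Int.toStr xval ++ "," ++ PySem.Int.toStr (yval + 1)]) (by omega) h3
      exact ⟨[PySem.Int.toStr xval ++ "," ++ PySem.Int.toStr (yval + 1)] ++ l, by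
        simpa [List.append_assoc] using hl⟩
    · have heq : yval + 1 = maxSize - 1 := by omega
      refine ⟨[], ?_⟩
      rw [getRowRightLoop]
      simp [heq]

theorem getRowRightLoop_ge (xval maxSize yval : Int) (acc : List String)
    (h : maxSize - 1 ≤ yval) : getRowRightLoop xval maxSize yval acc = (acc, yval) := by
  rw [getRowRightLoop]
  by_cases h1 : yval ≤ maxSize - 1
  · have h2 : ¬ yval + 1 ≤ maxSize - 1 := by omega
    simp [h1, h2]
  · simp [h1]

-- ===== VERDICT (by name: the statement is the Claim_ definition above) =====
theorem getRowRight_spec : Claim_equal_getRowRight := by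
  intro xval yval maxSize _
  unfold Spec_getRowRight getRowRight getRowRight_alt
  by_cases hy : yval < maxSize - 1
  · obtain ⟨l, hl⟩ := getRowRightLoop_lt xval maxSize (maxSize - 1 - yval).toNat yval [] rfl hy
    rw [hl]
    have hmax : max yval (maxSize - 1) = maxSize - 1 := by omega
    simp [PySem.List.pyGet?_neg_one_append_singleton, hmax]
  · rw [getRowRightLoop_ge xval maxSize yval [] (by omega)]
    have hmax : max yval (maxSize - 1) = yval := by omega
    simp [hmax, PySem.List.pyGet?_neg_one]
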